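-- pv_equiv track=rewrite | github.com/otsuneko/competitive-programming | field/contests/atcoder/abc261/e.py | countGreaterXOR
-- ===== SOURCE A (Python) =====
-- def countGreaterXOR(n):
--     '''
--     0<x<nのxのうち、x^n>nとなるようなxの個数を返す
--     '''
--     k = 0
--     cnt = 0
--     while n > 0:
--         if (n&1) == 0:
--             cnt += pow(2,k)
--         k += 1
--         n >>= 1
--     return cnt
-- ===== SOURCE B (Python) =====
-- def countGreaterXOR(n):
--     '''
--     0<x<nのxのうち、x^n>nとなるようなxの個数を返す
--     '''
--     if n <= 0:
--         return 0
--     return (1 << n.bit_length()) - 1 - n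
-- ===== Notes on version B (the rewrite author's own statement) =====
-- stated objective: simpler
-- what changed: Replaced the bit-scan loop summing powers of two over n's zero bits with a single closed-form arithmetic expression from n.bit_length(), guarded by the non-positive case.
import Mathlib
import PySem

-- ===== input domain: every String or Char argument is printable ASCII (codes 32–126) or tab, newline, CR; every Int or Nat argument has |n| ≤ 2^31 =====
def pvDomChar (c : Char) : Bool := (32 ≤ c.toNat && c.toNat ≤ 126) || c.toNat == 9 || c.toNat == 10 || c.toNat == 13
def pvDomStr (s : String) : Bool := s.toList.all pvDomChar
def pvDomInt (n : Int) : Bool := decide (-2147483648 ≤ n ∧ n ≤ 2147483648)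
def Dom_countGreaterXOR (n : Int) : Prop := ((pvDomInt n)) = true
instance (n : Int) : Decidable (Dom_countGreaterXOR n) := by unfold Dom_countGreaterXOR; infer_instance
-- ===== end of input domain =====

-- B replaces A's bit-scan loop by the closed form 2^bit_length(n) - 1 - n (guarded by n <= 0): simpler, a single arithmetic expression.


-- ===== PORT A =====
-- the while-loop of A as structural recursion on the same state (n, k, cnt);
-- n&1 → PySem.Int.band, n>>=1 → PySem.Int.floordiv n 2 (exact: Python's >>1 is floor division by 2);
-- pow(2,k) → 2^k.toNat (k starts at 0 and only increments, so it is always nonnegative)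
def countGreaterXORLoop (n k cnt : Int) : Int :=
  if h : n > 0 then
    countGreaterXORLoop (PySem.Int.floordiv n 2) (k + 1)
      (if PySem.Int.band n 1 = 0 then cnt + 2 ^ k.toNat else cnt)
  else cnt
termination_by n.toNat
decreasing_by
  rw [PySem.Int.floordiv_eq_ediv_of_pos (by omega)]
  omega

def countGreaterXOR (n : Int) : Int := countGreaterXORLoop n 0 0

-- ===== PORT B =====
-- (1 << n.bit_length()) → 2 ^ PySem.Int.bitLength n
def countGreaterXOR_alt (n : Int) : Int :=
  if n ≤ 0 then 0
  else 2 ^ PySem.Int.bitLength n - 1 - n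

-- ===== PRECONDITION & SPEC =====
def Spec_countGreaterXOR (n : Int) (out : Int) : Prop := out = countGreaterXOR_alt n
instance (n : Int) (out : Int) : Decidable (Spec_countGreaterXOR n out) := by unfold Spec_countGreaterXOR; infer_instance

-- ===== CLAIM (what is proved, stated in full; the proofs are below) =====
def Claim_equal_countGreaterXOR : Prop := ∀ (n : Int), Dom_countGreaterXOR n → Spec_countGreaterXOR n (countGreaterXOR n)

-- ===== LEMMAS AND PROOFS =====

-- loop invariant: on a nonnegative value m the loop adds 2^k * (2^bitLength(m) - 1 - m) to cnt
theorem countGreaterXORLoop_eq (m : Nat) : ∀ (k : Nat) (cnt : Int),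
    countGreaterXORLoop (m : Int) (k : Int) cnt
      = cnt + 2 ^ k * (2 ^ PySem.Int.bitLength (m : Int) - 1 - m) := by
  induction m using Nat.strong_induction_on with
  | _ m ih =>
    intro k cnt
    by_cases hm : 0 < m
    · rw [countGreaterXORLoop]
      have h2 : (m : Int) > 0 := by exact_mod_cast hm
      rw [dif_pos h2]
      have hdiv : PySem.Int.floordiv (m : Int) 2 = ((m / 2 : Nat) : Int) :=
        PySem.Int.floordiv_natCast m 2
      have hband : PySem.Int.band (m : Int) 1 = ((m % 2 : Nat) : Int) := by
        rw [PySem.Int.band_one]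
        exact_mod_cast PySem.Int.mod_natCast m 2
      have hk1 : (k : Int) + 1 = ((k + 1 : Nat) : Int) := by push_cast; ring
      rw [hdiv, hband, hk1, ih (m / 2) (by omega) (k + 1)]
      rw [PySem.Int.bitLength_natCast hm]
      have hkt : ((k : Int)).toNat = k := Int.toNat_natCast k
      have hmod : m % 2 = 0 ∨ m % 2 = 1 := by omega
      have hm2 : m = 2 * (m / 2) + m % 2 := by omega
      generalize 2 ^ PySem.Int.bitLength ((m / 2 : Nat) : Int) = B
      generalize hq : ((m / 2 : Nat) : Int) = q
      have hmq : (m : Int) = 2 * q + ((m % 2 : Nat) : Int) := by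
        rw [← hq]; push_cast; omega
      rcases hmod with h0 | h1
      · rw [if_pos (by exact_mod_cast congrArg (Nat.cast (R := Int)) h0)]
        rw [hkt, hmq, h0]
        push_cast
        ring
      · rw [if_neg (by simp [h1])]
        rw [hmq, h1]
        push_cast
        ring
    · have hm0 : m = 0 := by omega
      subst hm0
      rw [countGreaterXORLoop, dif_neg (by norm_num)]
      simp [PySem.Int.bitLength_zero]

-- ===== VERDICT (by name: the statement is the Claim_ definition above) =====
theorem countGreaterXOR_spec : Claim_equal_countGreaterXOR := by
  intro n _
  unfold Spec_countGreaterXOR countGreaterXOR countGreaterXOR_alt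
  by_cases hn : n ≤ 0
  · rw [if_pos hn, countGreaterXORLoop, dif_neg (by omega)]
  · rw [if_neg hn]
    obtain ⟨m, rfl⟩ : ∃ m : Nat, n = (m : Int) :=
      ⟨n.toNat, (Int.toNat_of_nonneg (by omega)).symm⟩
    have := countGreaterXORLoop_eq m 0 0
    simpa using this
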